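-- pv_equiv track=rewrite | github.com/Penguin1866s/DAM-code | Proyects/00-Sudoku/modulated/sudoku_tdd_(pytest)/src/s01_check_num.py | check_num_range
-- ===== SOURCE A (Python) =====
-- def check_num_range(sudoku):
--     num_range = [1, 2, 3, 4, 5, 6, 7, 8, 9]
--     for n in sudoku:
--         if all(sub_n in num_range for sub_n in n):
--             continue
--         else:
--             return False
--     range_for_sudoku = []
--     k = 0
--     for n in sudoku[0]:
--         k += 1
--         range_for_sudoku.append(k)
--     for n in sudoku:
--         if all(sub_n in range_for_sudoku for sub_n in n):
--             continue
--         else: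
--             return False
--     return True
-- ===== SOURCE B (Python) =====
-- def check_num_range(sudoku):
--     width = len(sudoku[0])
--     allowed = [v for v in range(1, 10) if v <= width]
--     return all(cell in allowed for row in sudoku for cell in row)
-- ===== Notes on version B (the rewrite author's own statement) =====
-- stated objective: simpler
-- what changed: Replaced A's three loops (a 1..9 membership pass, a counting loop building [1..width], and a second membership pass) with one precomputed allowed-values table and a single flattened membership pass over all cells.
import Mathlib
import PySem

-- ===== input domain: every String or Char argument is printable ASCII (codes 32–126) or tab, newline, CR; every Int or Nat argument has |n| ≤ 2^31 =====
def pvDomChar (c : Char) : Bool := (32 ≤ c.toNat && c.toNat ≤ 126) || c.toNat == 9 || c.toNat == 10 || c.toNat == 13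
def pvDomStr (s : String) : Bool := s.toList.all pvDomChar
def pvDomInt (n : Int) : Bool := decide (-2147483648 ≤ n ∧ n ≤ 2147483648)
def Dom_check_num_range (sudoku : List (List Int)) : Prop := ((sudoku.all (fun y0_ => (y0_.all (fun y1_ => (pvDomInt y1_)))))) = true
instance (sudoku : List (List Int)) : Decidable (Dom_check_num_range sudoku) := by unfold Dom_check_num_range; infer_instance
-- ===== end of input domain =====

-- B collapses A's three loops into one flattened membership pass over a precomputed
-- allowed-values table; same return value on every non-empty grid (objective: simpler).

-- ===== PORT A =====
-- A's 'for n in sudoku: if all(... in allowed ...): continue else: return False' loops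
def pvCheckRows (allowed : List Int) : List (List Int) → Bool
  | [] => true
  | n :: rest => if n.all (fun c => allowed.contains c) then pvCheckRows allowed rest else false

def check_num_range (sudoku : List (List Int)) : Bool :=
  let num_range : List Int := [1, 2, 3, 4, 5, 6, 7, 8, 9]
  if pvCheckRows num_range sudoku then
    match PySem.List.pyGet? sudoku 0 with  -- sudoku[0]; none = IndexError, outside Pre_
    | none => false
    | some row0 =>
      -- k = 0; for n in sudoku[0]: k += 1; range_for_sudoku.append(k)
      let range_for_sudoku :=
        (row0.foldl (fun (st : List Int × Int) _ => (st.1 ++ [st.2 + 1], st.2 + 1)) ([], 0)).1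
      pvCheckRows range_for_sudoku sudoku
  else false

-- ===== PORT B =====
def check_num_range_alt (sudoku : List (List Int)) : Bool :=
  match PySem.List.pyGet? sudoku 0 with  -- width = len(sudoku[0]); none = IndexError, outside Pre_
  | none => false
  | some row0 =>
    let width : Int := row0.length
    let allowed := (PySem.List.pyRange 1 10 1).filter (fun v => v ≤ width)
    sudoku.all (fun row => row.all (fun cell => allowed.contains cell))

-- ===== PRECONDITION & SPEC =====
-- Pre_ excludes only the empty grid, on which A raises IndexError at sudoku[0] (B does too).
def Pre_check_num_range (sudoku : List (List Int)) : Prop := sudoku ≠ []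
instance (sudoku : List (List Int)) : Decidable (Pre_check_num_range sudoku) := by
  unfold Pre_check_num_range; infer_instance

def pvWitness_check_num_range : List (List Int) := [[1, 2], [2, 1]]

def Spec_check_num_range (sudoku : List (List Int)) (out : Bool) : Prop := out = check_num_range_alt sudoku
instance (sudoku : List (List Int)) (out : Bool) : Decidable (Spec_check_num_range sudoku out) := by unfold Spec_check_num_range; infer_instance

-- ===== CLAIM (what is proved, stated in full; the proofs are below) =====
def Claim_equal_check_num_range : Prop := ∀ (sudoku : List (List Int)), Dom_check_num_range sudoku → Pre_check_num_range sudoku → Spec_check_num_range sudoku (check_num_range sudoku)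

-- ===== LEMMAS AND PROOFS =====

-- A's early-return row loop is an 'all' over the rows
theorem pvCheckRows_eq_all (allowed : List Int) (s : List (List Int)) :
    pvCheckRows allowed s = s.all (fun n => n.all (fun c => allowed.contains c)) := by
  induction s with
  | nil => rfl
  | cons n rest ih =>
    cases hb : n.all (fun c => allowed.contains c) <;>
      simp only [pvCheckRows, hb, if_true, Bool.false_eq_true, if_false, List.all_cons,
        Bool.true_and, Bool.false_and, ih]

-- A's counting loop builds the range [k+1, …, k+len]
theorem pvFold_range (row : List Int) :
    ∀ (acc : List Int) (k : Int),
      (row.foldl (fun (st : List Int × Int) _ => (st.1 ++ [st.2 + 1], st.2 + 1)) (acc, k)).1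
        = acc ++ PySem.List.pyRange (k + 1) (k + 1 + row.length) 1 := by
  induction row with
  | nil => intro acc k; simp [PySem.List.pyRange_one_eq_nil]
  | cons x xs ih =>
    intro acc k
    simp only [List.foldl_cons]
    rw [ih (acc ++ [k + 1]) (k + 1)]
    have hb : (k + 1 + 1 + (xs.length : Int)) = k + 1 + ((x :: xs).length : Int) := by
      push_cast [List.length_cons]; ring
    rw [hb, PySem.List.pyRange_one_cons
      (show k + 1 < k + 1 + ((x :: xs).length : Int) by simp)]
    simp [List.append_assoc]

theorem check_num_range_spec : Claim_equal_check_num_range := by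
  intro sudoku _ hpre
  unfold Spec_check_num_range
  match sudoku, hpre with
  | r :: rest, _ =>
    unfold check_num_range check_num_range_alt
    simp only [PySem.List.pyGet?_zero_cons]
    rw [pvFold_range r [] 0, pvCheckRows_eq_all, pvCheckRows_eq_all]
    rw [show ∀ a b : Bool, (if a then b else false) = (a && b) by decide]
    rw [Bool.eq_iff_iff]
    simp only [Bool.and_eq_true, List.all_eq_true, List.contains_iff_mem,
      PySem.List.mem_pyRange_one, List.mem_filter, List.nil_append, decide_eq_true_eq]
    constructor
    · rintro ⟨h1, h2⟩ row hrow c hc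
      obtain h1c := h1 row hrow c hc
      obtain ⟨h2a, h2b⟩ := h2 row hrow c hc
      refine ⟨⟨?_, ?_⟩, by omega⟩ <;> simp at h1c <;> omega
    · intro h
      constructor
      · intro row hrow c hc
        obtain ⟨⟨ha, hb⟩, _⟩ := h row hrow c hc
        simp; omega
      · intro row hrow c hc
        obtain ⟨⟨ha, _⟩, hc2⟩ := h row hrow c hc
        exact ⟨by omega, by omega⟩
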